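-- pv_equiv track=rewrite | github.com/PrimePotato/bh | src/data_utils.py | forward_fill_outliers
-- ===== SOURCE A (Python) =====
-- def fill_find_next(i, sorted_seq):
--     for s in sorted_seq:
--         if s > i:
--             return s
--     return sorted_seq[-1]
--
-- def forward_fill_outliers(series, outlier_indicies):
--     good_indiicies = sorted(list(set(range(len(series))) - set(outlier_indicies)))
--     try:
--         filled = series.copy()
--         for oi in outlier_indicies:
--             ri = fill_find_next(oi, good_indiicies)
--             filled[oi] = series[ri]
--         return filled
--     except Exception:
--         return None
-- ===== SOURCE B (Python) =====
-- def _first_greater(good, x):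
--     lo, hi = 0, len(good)
--     while lo < hi:
--         mid = (lo + hi) // 2
--         if good[mid] <= x:
--             lo = mid + 1
--         else:
--             hi = mid
--     return lo
--
-- def forward_fill_outliers(series, outlier_indicies):
--     n = len(series)
--     bad = set(outlier_indicies)
--     good = [i for i in range(n) if i not in bad]
--     filled = list(series)
--     try:
--         for oi in outlier_indicies:
--             j = _first_greater(good, oi)
--             ri = good[j] if j < len(good) else good[-1]
--             filled[oi] = series[ri]
--         return filled
--     except IndexError:
--         return None
-- ===== Notes on version B (the rewrite author's own statement) =====
-- stated objective: alternative
-- what changed: B builds the good-index list in one filtered pass over range(n) instead of set-difference-plus-sort, and replaces A's per-outlier linear scan (fill_find_next) with a binary search for the first good index greater than the outlier index (intended as faster; measured only 1.3x at the largest timing size, so not claimed).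
import Mathlib
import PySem

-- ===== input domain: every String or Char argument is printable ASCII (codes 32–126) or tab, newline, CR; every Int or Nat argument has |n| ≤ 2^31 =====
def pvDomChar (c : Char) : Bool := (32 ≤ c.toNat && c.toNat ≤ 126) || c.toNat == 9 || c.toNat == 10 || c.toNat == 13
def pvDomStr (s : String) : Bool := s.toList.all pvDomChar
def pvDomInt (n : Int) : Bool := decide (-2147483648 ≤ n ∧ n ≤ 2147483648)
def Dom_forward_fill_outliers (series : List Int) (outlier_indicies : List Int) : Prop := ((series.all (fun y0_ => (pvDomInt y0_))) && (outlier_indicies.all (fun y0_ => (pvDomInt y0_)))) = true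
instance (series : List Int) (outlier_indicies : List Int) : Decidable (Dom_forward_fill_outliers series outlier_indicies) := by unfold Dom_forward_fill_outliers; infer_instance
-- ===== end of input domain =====

-- B replaces A's per-outlier linear scan of the good indices by a hand-written binary search,
-- and builds the good-index list by one filtered pass instead of set-difference-then-sort (alternative algorithm).


-- ===== PORT A =====
-- 'for s in sorted_seq: if s > i: return s' then 'return sorted_seq[-1]'; none = IndexError (empty list)
def fillFindAux (i : Int) (full : List Int) : List Int → Option Int
  | [] => PySem.List.pyGet? full (-1)
  | s :: rest => if s > i then some s else fillFindAux i full rest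

def fill_find_next (i : Int) (sorted_seq : List Int) : Option Int :=
  fillFindAux i sorted_seq sorted_seq

-- the try/except returning None is modelled by the Option accumulator: any raising step makes the result none
def forward_fill_outliers (series : List Int) (outlier_indicies : List Int) : Option (List Int) :=
  let good_indiicies := PySem.List.sorted
    (PySem.Set.diff (PySem.Set.ofList (PySem.List.pyRange 0 (series.length : Int)))
      (PySem.Set.ofList outlier_indicies)) (fun x => x) false
  outlier_indicies.foldl
    (fun acc oi =>
      acc.bind fun filled =>
        (fill_find_next oi good_indiicies).bind fun ri =>
          (PySem.List.pyGet? series ri).bind fun v =>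
            PySem.List.pySet? filled oi v)
    (some series)

-- ===== PORT B =====
-- Source B's hand-written binary search: index of the first element > x in the sorted list
def fgLoop (good : List Int) (x : Int) (lo hi : Nat) : Nat :=
  if h : lo < hi then
    let mid := (lo + hi) / 2
    if good.getD mid 0 ≤ x then fgLoop good x (mid + 1) hi else fgLoop good x lo mid
  else lo
termination_by hi - lo
decreasing_by all_goals omega

def first_greater (good : List Int) (x : Int) : Nat := fgLoop good x 0 good.length

def forward_fill_outliers_alt (series : List Int) (outlier_indicies : List Int) : Option (List Int) :=
  let n := series.length
  let bad := PySem.Set.ofList outlier_indicies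
  let good := (PySem.List.pyRange 0 (n : Int)).filter (fun i => !(PySem.Set.contains bad i))
  outlier_indicies.foldl
    (fun acc oi =>
      acc.bind fun filled =>
        let j := first_greater good oi
        (if j < good.length then some (good.getD j 0) else PySem.List.pyGet? good (-1)).bind fun ri =>
          (PySem.List.pyGet? series ri).bind fun v =>
            PySem.List.pySet? filled oi v)
    (some series)

-- ===== PRECONDITION & SPEC =====
def Spec_forward_fill_outliers (series : List Int) (outlier_indicies : List Int) (out : Option (List Int)) : Prop := out = forward_fill_outliers_alt series outlier_indicies
instance (series : List Int) (outlier_indicies : List Int) (out : Option (List Int)) : Decidable (Spec_forward_fill_outliers series outlier_indicies out) := by unfold Spec_forward_fill_outliers; infer_instance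

-- ===== CLAIM (what is proved, stated in full; the proofs are below) =====
def Claim_equal_forward_fill_outliers : Prop := ∀ (series : List Int) (outlier_indicies : List Int), Dom_forward_fill_outliers series outlier_indicies → Spec_forward_fill_outliers series outlier_indicies (forward_fill_outliers series outlier_indicies)

-- ===== LEMMAS AND PROOFS =====

-- the good list is strictly increasing
theorem good_sorted (series outlier_indicies : List Int) :
    ((PySem.List.pyRange 0 (series.length : Int)).filter
      (fun i => !(PySem.Set.contains (PySem.Set.ofList outlier_indicies) i))).Pairwise (· < ·) := by
  apply List.Pairwise.filter
  rw [PySem.List.pyRange_zero_natCast]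
  exact (List.pairwise_lt_range.map _ (by intro a b h; exact_mod_cast h))

-- A's good-index list is B's good-index list
theorem good_eq (series outlier_indicies : List Int) :
    PySem.List.sorted
      (PySem.Set.diff (PySem.Set.ofList (PySem.List.pyRange 0 (series.length : Int)))
        (PySem.Set.ofList outlier_indicies)) (fun x => x) false
    = (PySem.List.pyRange 0 (series.length : Int)).filter
        (fun i => !(PySem.Set.contains (PySem.Set.ofList outlier_indicies) i)) := by
  have hnd : (PySem.List.pyRange 0 (series.length : Int)).Nodup := by
    rw [PySem.List.pyRange_zero_natCast]
    exact (List.nodup_range).map (fun a b => by exact_mod_cast id)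
  rw [show PySem.Set.diff (PySem.Set.ofList (PySem.List.pyRange 0 (series.length : Int)))
        (PySem.Set.ofList outlier_indicies)
      = (PySem.List.pyRange 0 (series.length : Int)).filter
        (fun i => !(PySem.Set.contains (PySem.Set.ofList outlier_indicies) i)) from by
    rw [PySem.Set.diff, PySem.Set.ofList_eq_self_of_nodup _ hnd]]
  exact PySem.List.sorted_eq_of_perm_of_pairwise_lt _ _ _ (List.Perm.refl _) (good_sorted series outlier_indicies)

-- the binary search returns the split point: everything before it is ≤ x, everything from it on is > x
theorem fgLoop_spec (good : List Int) (x : Int)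
    (hsorted : good.Pairwise (· ≤ ·)) (lo hi : Nat) :
    lo ≤ hi → hi ≤ good.length →
    (∀ j (hj : j < good.length), j < lo → good[j] ≤ x) →
    (∀ j (hj : j < good.length), hi ≤ j → x < good[j]) →
    fgLoop good x lo hi ≤ good.length ∧
    (∀ j (hj : j < good.length), j < fgLoop good x lo hi → good[j] ≤ x) ∧
    (∀ j (hj : j < good.length), fgLoop good x lo hi ≤ j → x < good[j]) := by
  have hmono := List.pairwise_iff_getElem.mp hsorted
  have hmle : ∀ (i j : Nat) (hi' : i < good.length) (hj' : j < good.length),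
      i ≤ j → good[i] ≤ good[j] := by
    intro i j hi' hj' hij
    rcases Nat.eq_or_lt_of_le hij with h | h
    · exact le_of_eq (by congr)
    · exact hmono i j hi' hj' h
  induction lo, hi using fgLoop.induct good x with
  | case1 lo hi hlt mid hle ih =>
    intro _ hhi hb ha
    have hmidlt : (lo + hi) / 2 < good.length := by omega
    have hle' : good.getD ((lo + hi) / 2) 0 ≤ x := hle
    rw [List.getD_eq_getElem good 0 hmidlt] at hle'
    have hle'' : good.getD ((lo + hi) / 2) 0 ≤ x := hle
    rw [fgLoop]; simp only [dif_pos hlt, if_pos hle'']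
    apply ih (by omega) hhi
    · intro j hj hjlt
      rcases Nat.lt_or_ge j lo with h | h
      · exact hb j hj h
      · exact le_trans (hmle j _ hj hmidlt (Nat.le_of_lt_succ hjlt)) hle'
    · exact ha
  | case2 lo hi hlt mid hgt ih =>
    intro hlo _ hb ha
    have hmidlt : (lo + hi) / 2 < good.length := by omega
    have hgt' : ¬ good.getD ((lo + hi) / 2) 0 ≤ x := hgt
    have hxm : x < good[(lo + hi) / 2] := by
      rw [List.getD_eq_getElem good 0 hmidlt] at hgt'; omega
    have hgt'' : ¬ good.getD ((lo + hi) / 2) 0 ≤ x := hgt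
    rw [fgLoop]; simp only [dif_pos hlt, if_neg hgt'']
    apply ih (by omega) (by omega) hb
    intro j hj hle2
    exact lt_of_lt_of_le hxm (hmle _ j hmidlt hj hle2)
  | case3 lo hi hnlt =>
    intro hlo hhi hb ha
    rw [fgLoop]; simp only [dif_neg hnlt]
    exact ⟨by omega, hb, fun j hj h => ha j hj (by omega)⟩

-- A's scan is 'first match, else the [-1] fallback'
theorem fillFindAux_find? (x : Int) (full : List Int) : ∀ l : List Int,
    fillFindAux x full l = ((l.find? (fun s => decide (x < s))).map some).getD (PySem.List.pyGet? full (-1))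
  | [] => rfl
  | s :: rest => by
    by_cases h : x < s
    · simp [fillFindAux, h, gt_iff_lt]
    · simp [fillFindAux, h, gt_iff_lt, fillFindAux_find? x full rest]

-- A's linear scan agrees with B's binary-search lookup on a sorted list
theorem find_next_eq (good : List Int) (x : Int) (hs : good.Pairwise (· ≤ ·)) :
    fill_find_next x good =
      (if first_greater good x < good.length
        then some (good.getD (first_greater good x) 0)
        else PySem.List.pyGet? good (-1)) := by
  obtain ⟨hr, hbel, hab⟩ := fgLoop_spec good x hs 0 good.length (Nat.zero_le _) (le_refl _)
    (by omega) (by intro j hj h; omega)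
  rw [fill_find_next, fillFindAux_find? x good good]
  simp only [first_greater]
  by_cases h : fgLoop good x 0 good.length < good.length
  · have hfind : good.find? (fun s => decide (x < s)) = some good[fgLoop good x 0 good.length] := by
      rw [List.find?_eq_some_iff_getElem]
      refine ⟨by simpa using hab _ h (le_refl _), fgLoop good x 0 good.length, h, rfl, ?_⟩
      intro j hj
      simpa using hbel j (by omega) hj
    rw [hfind, if_pos h, List.getD_eq_getElem good 0 h]
    rfl
  · have hfind : good.find? (fun s => decide (x < s)) = none := by
      rw [List.find?_eq_none]
      intro y hy
      obtain ⟨j, hj, rfl⟩ := List.mem_iff_getElem.mp hy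
      simpa using hbel j hj (by omega)
    rw [hfind, if_neg h]
    rfl

-- ===== VERDICT (by name: the statement is the Claim_ definition above) =====
theorem forward_fill_outliers_spec : Claim_equal_forward_fill_outliers := by
  intro series outlier_indicies _
  unfold Spec_forward_fill_outliers forward_fill_outliers forward_fill_outliers_alt
  simp only [good_eq]
  apply PySem.List.foldl_congr_mem
  intro acc oi _
  have hs : ((PySem.List.pyRange 0 (series.length : Int)).filter
      (fun i => !(PySem.Set.contains (PySem.Set.ofList outlier_indicies) i))).Pairwise (· ≤ ·) :=
    (good_sorted series outlier_indicies).imp (fun h => le_of_lt h)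
  rw [find_next_eq _ _ hs]
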